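-- pv_equiv track=rewrite | github.com/ajanvaraus/advent_of_code_2025 | day_5/day_5v2.py | uniqueNums
-- ===== SOURCE A (Python) =====
-- def uniqueNums(r) :
--     # order from lowest low onwards
--     orderedLow = [r[0][0]]
--     orderedHigh = [r[1][0]]
--     for i in range(1,len(r[0])) :
--         placed = False
--         for j in range(len(orderedLow)) :
--             if (r[0][i] < orderedLow[j] and not placed) :
--                 orderedLow.insert(j,r[0][i])
--                 orderedHigh.insert(j,r[1][i])
--                 placed = True
--         if(not placed) :
--             orderedLow.append(r[0][i])
--             orderedHigh.append(r[1][i])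
--
--     comp = 0
--     for i in range(1,len(orderedLow)) :
--         if (orderedHigh[i-1-comp]>= orderedLow[i-comp]) :
--             del orderedLow[i-comp]
--             if (orderedHigh[i-1-comp] < orderedHigh[i-comp]) :
--                 del orderedHigh[i-1-comp]
--             else :
--                 del orderedHigh[i-comp]
--             comp += 1
--
--     num = 0
--     for i in range(len(orderedLow)) :
--         num += orderedHigh[i]-orderedLow[i]+1
--
--     return num
-- ===== SOURCE B (Python) =====
-- def uniqueNums(r):
--     # sort (low, high) pairs by low, then one linear merge-and-count pass
--     ivs = sorted(zip(r[0], r[1]), key=lambda p: p[0])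
--     total = 0
--     cur_lo, cur_hi = ivs[0]
--     for lo, hi in ivs[1:]:
--         if cur_hi >= lo:
--             if hi > cur_hi:
--                 cur_hi = hi
--         else:
--             total += cur_hi - cur_lo + 1
--             cur_lo, cur_hi = lo, hi
--     return total + cur_hi - cur_lo + 1
-- ===== Notes on version B (the rewrite author's own statement) =====
-- stated objective: alternative
-- what changed: Replaces A's parallel-list insertion sort and index/offset-juggling deletion pass with a stable library sort of (low, high) pairs followed by one merge-and-count accumulator pass (intended as the O(n log n) form; a timing run measured only about 1.49x at the largest size, so no speed is claimed).
import Mathlib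
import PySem

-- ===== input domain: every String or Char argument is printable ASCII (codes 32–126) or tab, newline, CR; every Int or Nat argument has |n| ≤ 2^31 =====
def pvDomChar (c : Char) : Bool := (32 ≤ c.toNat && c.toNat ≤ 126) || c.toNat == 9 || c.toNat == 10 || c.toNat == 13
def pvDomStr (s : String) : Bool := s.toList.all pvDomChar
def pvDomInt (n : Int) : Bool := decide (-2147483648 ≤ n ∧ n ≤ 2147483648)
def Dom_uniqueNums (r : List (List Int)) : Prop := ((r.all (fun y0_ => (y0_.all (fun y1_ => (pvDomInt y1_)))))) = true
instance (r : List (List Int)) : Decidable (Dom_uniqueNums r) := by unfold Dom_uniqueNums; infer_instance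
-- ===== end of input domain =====

-- B replaces A's parallel-list insertion pass and index/offset deletion pass by a stable sort of (low, high) pairs plus one merge-and-count scan; equivalence is about the return value (A mutates nothing observable).

-- ===== PORT A =====
-- del xs[i]; the none branch (IndexError in Python) is unreachable on the inputs admitted by Pre_
def pvDelAt (xs : List Int) (i : Int) : List Int :=
  match PySem.List.pop? xs i with
  | some p => p.2
  | none => xs

-- A's inner placement loop: insert x (and h in parallel) before the first strictly greater low, else append
def pvInsLH (x h : Int) : List Int → List Int → List Int × List Int
  | l :: ls, g :: gs =>
      if x < l then (x :: l :: ls, h :: g :: gs)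
      else
        let p := pvInsLH x h ls gs
        (l :: p.1, g :: p.2)
  | _, _ => ([x], [h])

-- one iteration of A's second loop (state: orderedLow, orderedHigh, comp)
def pvStep2 (st : List Int × List Int × Int) (i : Int) : List Int × List Int × Int :=
  if PySem.List.pyGetD st.2.1 (i - 1 - st.2.2) 0 ≥ PySem.List.pyGetD st.1 (i - st.2.2) 0 then
    (pvDelAt st.1 (i - st.2.2),
     (if PySem.List.pyGetD st.2.1 (i - 1 - st.2.2) 0 < PySem.List.pyGetD st.2.1 (i - st.2.2) 0
      then pvDelAt st.2.1 (i - 1 - st.2.2)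
      else pvDelAt st.2.1 (i - st.2.2)),
     st.2.2 + 1)
  else st

def uniqueNums (r : List (List Int)) : Int :=
  let l0 := PySem.List.pyGetD r 0 []
  let l1 := PySem.List.pyGetD r 1 []
  let p1 := (PySem.List.pyRange 1 (l0.length : Int)).foldl
      (fun (st : List Int × List Int) i =>
        pvInsLH (PySem.List.pyGetD l0 i 0) (PySem.List.pyGetD l1 i 0) st.1 st.2)
      ([PySem.List.pyGetD l0 0 0], [PySem.List.pyGetD l1 0 0])
  let st := (PySem.List.pyRange 1 (p1.1.length : Int)).foldl pvStep2 (p1.1, p1.2, 0)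
  (PySem.List.pyRange 0 (st.1.length : Int)).foldl
      (fun num i => num + (PySem.List.pyGetD st.2.1 i 0 - PySem.List.pyGetD st.1 i 0 + 1)) 0

-- ===== PORT B =====
-- one iteration of B's merge loop (state: total, cur_lo, cur_hi)
def pvMergeFold (st : Int × Int × Int) (p : Int × Int) : Int × Int × Int :=
  if st.2.2 ≥ p.1 then (st.1, st.2.1, if p.2 > st.2.2 then p.2 else st.2.2)
  else (st.1 + (st.2.2 - st.2.1 + 1), p.1, p.2)

def uniqueNums_alt (r : List (List Int)) : Int :=
  let ivs := PySem.List.sorted ((PySem.List.pyGetD r 0 []).zip (PySem.List.pyGetD r 1 [])) (fun p => p.1)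
  match ivs with
  | [] => 0  -- unreachable under Pre_ (Python's ivs[0] raises IndexError there)
  | p :: rest =>
      let st := rest.foldl pvMergeFold (0, p.1, p.2)
      st.1 + (st.2.2 - st.2.1 + 1)

-- ===== PRECONDITION & SPEC =====
-- exactly where the Python A returns: r[0] and r[1] must exist, r[0] must be nonempty
-- (it supplies r[0][0]/r[1][0]) and r[1] must be at least as long as r[0] (A reads r[1][i] for i < len(r[0]))
def Pre_uniqueNums (r : List (List Int)) : Prop :=
  2 ≤ r.length ∧ r.getD 0 [] ≠ [] ∧ (r.getD 0 []).length ≤ (r.getD 1 []).length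
instance (r : List (List Int)) : Decidable (Pre_uniqueNums r) := by unfold Pre_uniqueNums; infer_instance

def pvWitness_uniqueNums : List (List Int) := [[1, 5, 3], [2, 7, 4]]

def Spec_uniqueNums (r : List (List Int)) (out : Int) : Prop := out = uniqueNums_alt r
instance (r : List (List Int)) (out : Int) : Decidable (Spec_uniqueNums r out) := by unfold Spec_uniqueNums; infer_instance

-- ===== CLAIM (what is proved, stated in full; the proofs are below) =====
def Claim_equal_uniqueNums : Prop := ∀ (r : List (List Int)), Dom_uniqueNums r → Pre_uniqueNums r → Spec_uniqueNums r (uniqueNums r)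

-- ===== LEMMAS AND PROOFS =====

-- the merged interval list both programs compute, as one structural recursion
def pvMergeRec : Int → Int → List (Int × Int) → List (Int × Int)
  | lo, hi, [] => [(lo, hi)]
  | lo, hi, (l, h) :: t =>
      if hi ≥ l then pvMergeRec lo (if hi < h then h else hi) t
      else (lo, hi) :: pvMergeRec l h t

lemma mergeRec_cons (lo hi l h : Int) (t : List (Int × Int)) :
    pvMergeRec lo hi ((l, h) :: t)
      = if hi ≥ l then pvMergeRec lo (if hi < h then h else hi) t
        else (lo, hi) :: pvMergeRec l h t := rfl

lemma zip_proj : ∀ (ls gs : List Int), ls.length = gs.length →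
    (ls.zip gs).map Prod.fst = ls ∧ (ls.zip gs).map Prod.snd = gs := by
  intro ls
  induction ls with
  | nil => intro gs h; cases gs <;> simp_all
  | cons a t ih =>
    intro gs h
    cases gs with
    | nil => simp at h
    | cons b gt =>
      simp only [List.length_cons, Nat.add_right_cancel_iff] at h
      simp [ih gt h]

def pvBefore : Int × Int → Int × Int → Bool := fun a b => decide (a.1 < b.1)

lemma getD_append_len {α : Type} (u : List α) (x : α) (v : List α) (d : α) :
    (u ++ x :: v).getD u.length d = x := by
  rw [List.getD_eq_getElem?_getD, List.getElem?_append_right (Nat.le_refl u.length)]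
  simp

lemma eraseIdx_append_len {α : Type} (u : List α) (x : α) (v : List α) :
    (u ++ x :: v).eraseIdx u.length = u ++ v := by
  simp [List.eraseIdx_append_of_length_le (Nat.le_refl u.length)]

lemma zip_map_fst_snd {α β : Type} (P : List (α × β)) :
    (P.map Prod.fst).zip (P.map Prod.snd) = P := by
  induction P with
  | nil => rfl
  | cons p t ih => simp [ih]

lemma insLH_eq (x h : Int) : ∀ (oL oH : List Int), oL.length = oH.length →
    pvInsLH x h oL oH =
      ((PySem.List.insertBy pvBefore (x, h) (oL.zip oH)).map Prod.fst,
       (PySem.List.insertBy pvBefore (x, h) (oL.zip oH)).map Prod.snd) := by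
  intro oL
  induction oL with
  | nil => intro oH hlen; cases oH <;> simp_all [pvInsLH, PySem.List.insertBy]
  | cons l ls ih =>
    intro oH hlen
    cases oH with
    | nil => simp at hlen
    | cons g gs =>
      simp only [List.length_cons, Nat.add_right_cancel_iff] at hlen
      by_cases hx : x < l
      · simp [pvInsLH, PySem.List.insertBy, pvBefore, hx,
          (zip_proj ls gs hlen).1, (zip_proj ls gs hlen).2]
      · simp [pvInsLH, PySem.List.insertBy, pvBefore, hx, ih gs hlen]

lemma foldl_insLH (ps : List (Int × Int)) : ∀ (Z : List (Int × Int)),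
    ps.foldl (fun (st : List Int × List Int) p => pvInsLH p.1 p.2 st.1 st.2)
      (Z.map Prod.fst, Z.map Prod.snd)
    = ((ps.foldl (fun acc p => PySem.List.insertBy pvBefore p acc) Z).map Prod.fst,
       (ps.foldl (fun acc p => PySem.List.insertBy pvBefore p acc) Z).map Prod.snd) := by
  induction ps with
  | nil => intro Z; rfl
  | cons p t ih =>
    intro Z
    have := insLH_eq p.1 p.2 (Z.map Prod.fst) (Z.map Prod.snd) (by simp)
    rw [zip_map_fst_snd] at this
    simp only [List.foldl_cons, this, ih]

-- generic: an index loop over two parallel lists is a fold over their zip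
lemma fold_idx_two {β : Type} (f : β → Int → Int → β) (xs ys : List Int)
    (hlen : xs.length ≤ ys.length) :
    ∀ (m : Nat) (k : Nat) (init : β), xs.length - k ≤ m → k ≤ xs.length →
    (PySem.List.pyRange (k : Int) (xs.length : Int)).foldl
        (fun acc i => f acc (PySem.List.pyGetD xs i 0) (PySem.List.pyGetD ys i 0)) init
      = ((xs.zip ys).drop k).foldl (fun acc p => f acc p.1 p.2) init := by
  intro m
  induction m with
  | zero =>
    intro k init hm hk
    have hke : k = xs.length := by omega
    subst hke
    have h1 : PySem.List.pyRange (xs.length : Int) (xs.length : Int) = [] := by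
      simp [PySem.List.pyRange]
    have h2 : List.drop xs.length (xs.zip ys) = [] := by
      apply List.drop_eq_nil_of_le; simp <;> omega
    simp only [h1, h2, List.foldl_nil]
  | succ m ih =>
    intro k init hm hk
    by_cases hke : k = xs.length
    · subst hke
      have h1 : PySem.List.pyRange (xs.length : Int) (xs.length : Int) = [] := by
        simp [PySem.List.pyRange]
      have h2 : List.drop xs.length (xs.zip ys) = [] := by
        apply List.drop_eq_nil_of_le; simp <;> omega
      simp only [h1, h2, List.foldl_nil]
    · have hklt : k < xs.length := by omega
      have hky : k < ys.length := by omega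
      have hkz : k < (xs.zip ys).length := by simp <;> omega
      rw [PySem.List.pyRange_one_cons (by exact_mod_cast hklt), List.foldl_cons]
      have hx : PySem.List.pyGetD xs (k : Int) 0 = xs[k] := by
        rw [PySem.List.pyGetD_natCast, List.getD_eq_getElem?_getD, List.getElem?_eq_getElem hklt]; rfl
      have hy : PySem.List.pyGetD ys (k : Int) 0 = ys[k] := by
        rw [PySem.List.pyGetD_natCast, List.getD_eq_getElem?_getD, List.getElem?_eq_getElem hky]; rfl
      rw [hx, hy, List.drop_eq_getElem_cons hkz, List.foldl_cons]
      have hcast : ((k : Int) + 1) = ((k + 1 : Nat) : Int) := by push_cast; ring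
      rw [hcast, ih (k + 1) _ (by omega) (by omega)]
      simp [List.getElem_zip]

-- A's deletion loop, characterized: state (done ++ cur :: rest, comp) steps to done ++ mergeRec cur rest
lemma phase2_inv : ∀ (R D : List (Int × Int)) (clo chi : Int) (c : Nat),
    ∃ c' : Int,
    (PySem.List.pyRange ((D.length + c + 1 : Nat) : Int) ((D.length + c + 1 + R.length : Nat) : Int)).foldl
        pvStep2
        (D.map Prod.fst ++ clo :: R.map Prod.fst, D.map Prod.snd ++ chi :: R.map Prod.snd, (c : Int))
      = ((D ++ pvMergeRec clo chi R).map Prod.fst, (D ++ pvMergeRec clo chi R).map Prod.snd, c') := by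
  intro R
  induction R with
  | nil =>
    intro D clo chi c
    refine ⟨(c : Int), ?_⟩
    have h1 : PySem.List.pyRange ((D.length + c + 1 : Nat) : Int) ((D.length + c + 1 + 0 : Nat) : Int) = [] := by
      simp [PySem.List.pyRange]
    simp only [List.length_nil] at *
    rw [h1]
    simp [pvMergeRec]
  | cons p R' ih =>
    intro D clo chi c
    obtain ⟨l, h⟩ := p
    have hlt : ((D.length + c + 1 : Nat) : Int) < ((D.length + c + 1 + (R'.length + 1) : Nat) : Int) := by
      push_cast; omega
    rw [List.length_cons, PySem.List.pyRange_one_cons hlt, List.foldl_cons]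
    -- evaluate the step at index i = D.length + c + 1
    have hi1 : ((D.length + c + 1 : Nat) : Int) - 1 - (c : Int) = ((D.length : Nat) : Int) := by
      push_cast; ring
    have hi2 : ((D.length + c + 1 : Nat) : Int) - (c : Int) = ((D.length + 1 : Nat) : Int) := by
      push_cast; ring
    have hchi : PySem.List.pyGetD (D.map Prod.snd ++ chi :: (h :: R'.map Prod.snd)) ((D.length : Nat) : Int) 0 = chi := by
      rw [PySem.List.pyGetD_natCast]
      have : D.length = (D.map Prod.snd).length := by simp
      rw [this]; exact getD_append_len _ _ _ _
    have hl : PySem.List.pyGetD (D.map Prod.fst ++ clo :: (l :: R'.map Prod.fst)) ((D.length + 1 : Nat) : Int) 0 = l := by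
      rw [PySem.List.pyGetD_natCast]
      have h0 : D.map Prod.fst ++ clo :: (l :: R'.map Prod.fst)
          = (D.map Prod.fst ++ [clo]) ++ l :: R'.map Prod.fst := by simp
      have h1 : D.length + 1 = (D.map Prod.fst ++ [clo]).length := by simp
      rw [h0, h1]; exact getD_append_len _ _ _ _
    have hh : PySem.List.pyGetD (D.map Prod.snd ++ chi :: (h :: R'.map Prod.snd)) ((D.length + 1 : Nat) : Int) 0 = h := by
      rw [PySem.List.pyGetD_natCast]
      have h0 : D.map Prod.snd ++ chi :: (h :: R'.map Prod.snd)
          = (D.map Prod.snd ++ [chi]) ++ h :: R'.map Prod.snd := by simp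
      have h1 : D.length + 1 = (D.map Prod.snd ++ [chi]).length := by simp
      rw [h0, h1]; exact getD_append_len _ _ _ _
    have hdelL : pvDelAt (D.map Prod.fst ++ clo :: (l :: R'.map Prod.fst)) ((D.length + 1 : Nat) : Int)
        = D.map Prod.fst ++ clo :: R'.map Prod.fst := by
      unfold pvDelAt
      have hlen : D.length + 1 < (D.map Prod.fst ++ clo :: (l :: R'.map Prod.fst)).length := by simp <;> omega
      rw [PySem.List.pop?_natCast _ _ hlen]
      have h0 : D.map Prod.fst ++ clo :: (l :: R'.map Prod.fst)
          = (D.map Prod.fst ++ [clo]) ++ l :: R'.map Prod.fst := by simp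
      have h1 : D.length + 1 = (D.map Prod.fst ++ [clo]).length := by simp
      simp only [h0, h1, eraseIdx_append_len]
      simp
    have hdelH0 : pvDelAt (D.map Prod.snd ++ chi :: (h :: R'.map Prod.snd)) ((D.length : Nat) : Int)
        = D.map Prod.snd ++ h :: R'.map Prod.snd := by
      unfold pvDelAt
      have hlen : D.length < (D.map Prod.snd ++ chi :: (h :: R'.map Prod.snd)).length := by simp <;> omega
      rw [PySem.List.pop?_natCast _ _ hlen]
      have h1 : D.length = (D.map Prod.snd).length := by simp
      simp only [h1, eraseIdx_append_len]
    have hdelH1 : pvDelAt (D.map Prod.snd ++ chi :: (h :: R'.map Prod.snd)) ((D.length + 1 : Nat) : Int)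
        = D.map Prod.snd ++ chi :: R'.map Prod.snd := by
      unfold pvDelAt
      have hlen : D.length + 1 < (D.map Prod.snd ++ chi :: (h :: R'.map Prod.snd)).length := by simp <;> omega
      rw [PySem.List.pop?_natCast _ _ hlen]
      have h0 : D.map Prod.snd ++ chi :: (h :: R'.map Prod.snd)
          = (D.map Prod.snd ++ [chi]) ++ h :: R'.map Prod.snd := by simp
      have h1 : D.length + 1 = (D.map Prod.snd ++ [chi]).length := by simp
      simp only [h0, h1, eraseIdx_append_len]
      simp
    by_cases hcase : chi ≥ l
    · -- merge: cur becomes (clo, max chi h), comp increments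
      have hstep : pvStep2
          (D.map Prod.fst ++ clo :: ((l, h) :: R').map Prod.fst,
           D.map Prod.snd ++ chi :: ((l, h) :: R').map Prod.snd, (c : Int))
          (((D.length + c + 1 : Nat) : Int))
          = (D.map Prod.fst ++ clo :: R'.map Prod.fst,
             D.map Prod.snd ++ (if chi < h then h else chi) :: R'.map Prod.snd, ((c + 1 : Nat) : Int)) := by
        unfold pvStep2
        simp only [List.map_cons, hi1, hi2, hchi, hl, hh, hdelL, hdelH0, hdelH1]
        rw [if_pos hcase]
        by_cases hch : chi < h
        · rw [if_pos hch, if_pos hch]; push_cast; ring_nf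
        · rw [if_neg hch, if_neg hch]; push_cast; ring_nf
      rw [hstep]
      have hrange : ((D.length + c + 1 : Nat) : Int) + 1 = ((D.length + (c + 1) + 1 : Nat) : Int) := by
        push_cast; ring
      have hrange2 : ((D.length + c + 1 + (R'.length + 1) : Nat) : Int)
          = ((D.length + (c + 1) + 1 + R'.length : Nat) : Int) := by push_cast; ring
      rw [hrange, hrange2]
      have := ih D clo (if chi < h then h else chi) (c + 1)
      obtain ⟨c', hc'⟩ := this
      refine ⟨c', ?_⟩
      rw [hc']
      have : pvMergeRec clo chi ((l, h) :: R') = pvMergeRec clo (if chi < h then h else chi) R' := by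
        rw [mergeRec_cons, if_pos hcase]
      rw [this]
    · -- no merge: cur is emitted into done, next becomes cur
      have hstep : pvStep2
          (D.map Prod.fst ++ clo :: ((l, h) :: R').map Prod.fst,
           D.map Prod.snd ++ chi :: ((l, h) :: R').map Prod.snd, (c : Int))
          (((D.length + c + 1 : Nat) : Int))
          = (D.map Prod.fst ++ clo :: ((l, h) :: R').map Prod.fst,
             D.map Prod.snd ++ chi :: ((l, h) :: R').map Prod.snd, (c : Int)) := by
        unfold pvStep2
        simp only [List.map_cons, hi1, hi2, hchi, hl]
        rw [if_neg hcase]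
      rw [hstep]
      have hD : D.map Prod.fst ++ clo :: ((l, h) :: R').map Prod.fst
          = (D ++ [(clo, chi)]).map Prod.fst ++ l :: R'.map Prod.fst := by simp
      have hH : D.map Prod.snd ++ chi :: ((l, h) :: R').map Prod.snd
          = (D ++ [(clo, chi)]).map Prod.snd ++ h :: R'.map Prod.snd := by simp
      rw [hD, hH]
      have hrange : ((D.length + c + 1 : Nat) : Int) + 1 = (((D ++ [(clo, chi)]).length + c + 1 : Nat) : Int) := by
        push_cast; simp; ring
      have hrange2 : ((D.length + c + 1 + (R'.length + 1) : Nat) : Int)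
          = (((D ++ [(clo, chi)]).length + c + 1 + R'.length : Nat) : Int) := by push_cast; simp; ring
      rw [hrange, hrange2]
      obtain ⟨c', hc'⟩ := ih (D ++ [(clo, chi)]) l h c
      refine ⟨c', ?_⟩
      rw [hc']
      have : pvMergeRec clo chi ((l, h) :: R') = (clo, chi) :: pvMergeRec l h R' := by
        rw [mergeRec_cons, if_neg hcase]
      rw [this]
      simp

-- B's accumulator fold computes the span sum of the merged list
lemma mergeFold_eq : ∀ (rest : List (Int × Int)) (tot clo chi : Int),
    (rest.foldl pvMergeFold (tot, clo, chi)).1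
      + ((rest.foldl pvMergeFold (tot, clo, chi)).2.2 - (rest.foldl pvMergeFold (tot, clo, chi)).2.1 + 1)
    = (pvMergeRec clo chi rest).foldl (fun acc p => acc + (p.2 - p.1 + 1)) tot := by
  intro rest
  induction rest with
  | nil => intro tot clo chi; simp [pvMergeRec]
  | cons p t ih =>
    intro tot clo chi
    obtain ⟨l, h⟩ := p
    by_cases hc : chi ≥ l
    · have hf : pvMergeFold (tot, clo, chi) (l, h) = (tot, clo, if chi < h then h else chi) := by
        unfold pvMergeFold
        rw [if_pos hc]
      have hm : pvMergeRec clo chi ((l, h) :: t) = pvMergeRec clo (if chi < h then h else chi) t := by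
        rw [mergeRec_cons, if_pos hc]
      rw [List.foldl_cons, hf, hm, ih]
    · have hf : pvMergeFold (tot, clo, chi) (l, h) = (tot + (chi - clo + 1), l, h) := by
        unfold pvMergeFold; rw [if_neg hc]
      have hm : pvMergeRec clo chi ((l, h) :: t) = (clo, chi) :: pvMergeRec l h t := by
        rw [mergeRec_cons, if_neg hc]
      rw [List.foldl_cons, hf, hm, List.foldl_cons, ih]

-- ===== VERDICT (by name: the statement is the Claim_ definition above) =====
theorem uniqueNums_spec : Claim_equal_uniqueNums := by
  intro r _hdom hpre
  obtain ⟨hr2, h0ne, hlen⟩ := hpre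
  -- name the two rows
  obtain ⟨a, l0', hl0⟩ : ∃ a t, r.getD 0 [] = a :: t := by
    cases h : r.getD 0 [] with
    | nil => exact absurd h h0ne
    | cons a t => exact ⟨a, t, rfl⟩
  have hr0 : PySem.List.pyGetD r 0 [] = a :: l0' := by
    rw [PySem.List.pyGetD_zero, hl0]
  have hlen' : (a :: l0').length ≤ (r.getD 1 []).length := by rw [← hl0]; exact hlen
  obtain ⟨b, l1', hl1⟩ : ∃ b t, r.getD 1 [] = b :: t := by
    cases h : r.getD 1 [] with
    | nil => rw [h] at hlen'; simp at hlen'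
    | cons b t => exact ⟨b, t, rfl⟩
  have hr1 : PySem.List.pyGetD r 1 [] = b :: l1' := by
    rw [show (1 : Int) = ((1 : Nat) : Int) from rfl, PySem.List.pyGetD_natCast, hl1]
  rw [hl1] at hlen'
  -- the sorted pair list
  set Z := PySem.List.sorted ((a :: l0').zip (b :: l1')) (fun p => p.1) with hZdef
  have hZfold : Z = ((a :: l0').zip (b :: l1')).foldl
      (fun acc p => PySem.List.insertBy pvBefore p acc) [] :=
    PySem.List.sorted_eq_foldl_insertBy _ _
  have hZlen : Z.length = l0'.length + 1 := by
    rw [hZdef, PySem.List.length_sorted, List.length_zip]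
    simp at hlen' ⊢
    omega
  obtain ⟨q, qs, hQ⟩ : ∃ q qs, Z = q :: qs := by
    cases h : Z with
    | nil => rw [h] at hZlen; simp at hZlen
    | cons q qs => exact ⟨q, qs, rfl⟩
  -- Phase 1 of A computes (Z.map fst, Z.map snd)
  have hA1 : (PySem.List.pyRange 1 ((a :: l0').length : Int)).foldl
      (fun (st : List Int × List Int) i =>
        pvInsLH (PySem.List.pyGetD (a :: l0') i 0) (PySem.List.pyGetD (b :: l1') i 0) st.1 st.2)
      ([PySem.List.pyGetD (a :: l0') 0 0], [PySem.List.pyGetD (b :: l1') 0 0])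
      = (Z.map Prod.fst, Z.map Prod.snd) := by
    have h0a : PySem.List.pyGetD (a :: l0') 0 0 = a := PySem.List.pyGetD_zero_cons _ _ _
    have h0b : PySem.List.pyGetD (b :: l1') 0 0 = b := PySem.List.pyGetD_zero_cons _ _ _
    rw [h0a, h0b]
    have hidx := fold_idx_two (fun (st : List Int × List Int) x y => pvInsLH x y st.1 st.2)
      (a :: l0') (b :: l1') hlen' (a :: l0').length 1 ([a], [b]) (by omega) (by simp)
    rw [show ((1 : Nat) : Int) = (1 : Int) from rfl] at hidx
    rw [hidx]
    have hdrop : ((a :: l0').zip (b :: l1')).drop 1 = l0'.zip l1' := by simp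
    have hinit : (([a], [b]) : List Int × List Int)
        = ([(a, b)].map Prod.fst, [(a, b)].map Prod.snd) := rfl
    rw [hdrop, hinit, foldl_insLH]
    rw [hZfold]
    have : (a :: l0').zip (b :: l1') = (a, b) :: l0'.zip l1' := rfl
    rw [this, List.foldl_cons]
    rfl
  -- Phase 2 of A computes the merged list
  have hM := phase2_inv qs [] q.1 q.2 0
  obtain ⟨c', hc'⟩ := hM
  simp only [List.length_nil, List.map_nil, List.nil_append, Nat.zero_add, Nat.cast_zero] at hc'
  set M := pvMergeRec q.1 q.2 qs with hMdef
  -- assemble: A's value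
  have hB : uniqueNums_alt r = M.foldl (fun acc p => acc + (p.2 - p.1 + 1)) 0 := by
    unfold uniqueNums_alt
    rw [hr0, hr1, ← hZdef, hQ]
    exact mergeFold_eq qs 0 q.1 q.2
  unfold Spec_uniqueNums uniqueNums
  simp only [hr0, hr1]
  rw [hA1, hQ]
  simp only [List.map_cons, List.length_cons, List.length_map]
  have hrange1 : (PySem.List.pyRange 1 ((qs.length + 1 : Nat) : Int))
      = PySem.List.pyRange ((0 + 0 + 1 : Nat) : Int) ((0 + 0 + 1 + qs.length : Nat) : Int) := by
    congr 1 <;> push_cast <;> ring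
  have hstep2 : (PySem.List.pyRange 1 ((qs.length + 1 : Nat) : Int)).foldl pvStep2
      (q.1 :: qs.map Prod.fst, q.2 :: qs.map Prod.snd, 0)
      = (M.map Prod.fst, M.map Prod.snd, c') := by
    rw [hrange1]
    exact hc'
  rw [hstep2]
  -- Phase 3 of A sums the spans of M; B's fold does the same
  have hsum : (PySem.List.pyRange 0 ((M.map Prod.fst).length : Int)).foldl
      (fun num i => num + (PySem.List.pyGetD (M.map Prod.snd) i 0 - PySem.List.pyGetD (M.map Prod.fst) i 0 + 1)) 0
      = M.foldl (fun acc p => acc + (p.2 - p.1 + 1)) 0 := by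
    have hidx := fold_idx_two (fun (acc : Int) x y => acc + (y - x + 1))
      (M.map Prod.fst) (M.map Prod.snd) (by simp) (M.map Prod.fst).length 0 0 (by omega) (by omega)
    rw [show ((0 : Nat) : Int) = (0 : Int) from rfl] at hidx
    rw [hidx, List.drop_zero, zip_map_fst_snd]
  simp only [List.length_map] at hsum ⊢
  rw [hsum, hB]
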